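-- pv_equiv track=rewrite | github.com/johnBamp/whisper-streaming | src/whisper_streaming/core.py | _trim_text_overlap
-- ===== SOURCE A (Python) =====
-- from typing import Any, Callable, Dict, Iterator, List, Optional, Protocol
--
-- def _join_clean(parts: List[str]) -> str:
--     cleaned = [part.strip() for part in parts if part and part.strip()]
--     return " ".join(cleaned)
--
-- def _normalize_token(token: str) -> str:
--     return "".join(ch for ch in token.lower() if ch.isalnum() or ch == "'")
--
-- def _trim_text_overlap(existing: str, candidate: str, lookback_chars: int = 400) -> str:
--     """
--     Remove overlap where `candidate` starts with text already at the tail of `existing`.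
--     """
--     existing_clean = _join_clean([existing])
--     candidate_clean = _join_clean([candidate])
--
--     if not candidate_clean:
--         return ""
--     if not existing_clean:
--         return candidate_clean
--
--     existing_words = [w for w in existing_clean.split() if _normalize_token(w)]
--     candidate_words = [w for w in candidate_clean.split() if _normalize_token(w)]
--     if not candidate_words:
--         return ""
--
--     existing_norm = [_normalize_token(w) for w in existing_words]
--     candidate_norm = [_normalize_token(w) for w in candidate_words]
--
--     lookback_tokens = min(max(1, lookback_chars // 4), len(existing_norm))
--     existing_tail = existing_norm[-lookback_tokens:]
--
--     # Candidate entirely repeated near the tail.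
--     if len(candidate_norm) <= len(existing_tail):
--         for i in range(0, len(existing_tail) - len(candidate_norm) + 1):
--             if existing_tail[i : i + len(candidate_norm)] == candidate_norm:
--                 return ""
--
--     # Token-based suffix/prefix overlap is robust to punctuation drift.
--     max_overlap = min(len(existing_tail), len(candidate_norm))
--     for n in range(max_overlap, 0, -1):
--         if existing_tail[-n:] == candidate_norm[:n]:
--             return " ".join(candidate_words[n:]).strip()
--
--     return " ".join(candidate_words).strip()
-- ===== SOURCE B (Python) =====
-- from typing import List
--
-- def _join_clean(parts: List[str]) -> str:
--     cleaned = [part.strip() for part in parts if part and part.strip()]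
--     return " ".join(cleaned)
--
-- def _normalize_token(token: str) -> str:
--     return "".join(ch for ch in token.lower() if ch.isalnum() or ch == "'")
--
-- def _trim_text_overlap(existing: str, candidate: str, lookback_chars: int = 400) -> str:
--     # One ascending scan over start positions in the tail replaces A's two loops
--     # (full-infix search, then descending suffix/prefix search): at each position i
--     # we extend a match of `cand` against tail[i:]; a full match means the candidate
--     # is repeated (drop it all), a match reaching the end of the tail is the longest
--     # suffix/prefix overlap (the two kinds of hit are mutually exclusive across
--     # positions, so the first hit decides).
--     candidate_clean = _join_clean([candidate])
--     if not candidate_clean: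
--         return ""
--     existing_clean = _join_clean([existing])
--     if not existing_clean:
--         return candidate_clean
--
--     candidate_words = [w for w in candidate_clean.split() if _normalize_token(w)]
--     if not candidate_words:
--         return ""
--     existing_words = [w for w in existing_clean.split() if _normalize_token(w)]
--
--     cand = [_normalize_token(w) for w in candidate_words]
--     exist = [_normalize_token(w) for w in existing_words]
--
--     lookback_tokens = min(max(1, lookback_chars // 4), len(exist))
--     tail = exist[len(exist) - lookback_tokens:]
--
--     t, m = len(tail), len(cand)
--     for i in range(t):
--         j = 0
--         while j < m and i + j < t and tail[i + j] == cand[j]: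
--             j += 1
--         if j == m:
--             return ""                      # candidate fully repeated in the tail
--         if i + j == t:
--             return " ".join(candidate_words[t - i:])   # overlap of t-i tokens
--     return " ".join(candidate_words)
-- ===== Notes on version B (the rewrite author's own statement) =====
-- stated objective: alternative
-- what changed: A's two separate scans over the tail tokens (a full-infix search loop, then a descending suffix/prefix overlap loop) are replaced by one ascending scan over start positions that extends a single match length per position; the two kinds of hit are mutually exclusive across positions, so the first hit decides, and A's redundant trailing .strip() calls are dropped (proved no-ops).
import Mathlib
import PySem

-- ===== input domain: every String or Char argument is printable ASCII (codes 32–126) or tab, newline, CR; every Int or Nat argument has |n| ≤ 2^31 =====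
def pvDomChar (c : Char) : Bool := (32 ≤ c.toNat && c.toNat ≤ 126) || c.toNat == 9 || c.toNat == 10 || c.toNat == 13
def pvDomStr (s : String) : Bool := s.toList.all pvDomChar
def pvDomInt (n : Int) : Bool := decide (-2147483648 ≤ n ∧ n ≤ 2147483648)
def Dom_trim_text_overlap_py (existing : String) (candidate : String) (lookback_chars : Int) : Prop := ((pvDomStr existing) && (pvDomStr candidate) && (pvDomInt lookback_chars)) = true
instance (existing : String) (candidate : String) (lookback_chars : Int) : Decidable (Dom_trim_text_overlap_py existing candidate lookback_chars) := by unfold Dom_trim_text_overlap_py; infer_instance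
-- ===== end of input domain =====

-- B replaces A's two separate scans (full-infix search, then a descending suffix/prefix
-- loop) by ONE ascending scan over start positions in the tail; same return value, proved
-- equal via a mutual-exclusivity argument between the two kinds of hit. Objective: alternative.

-- shared module helpers (_join_clean, _normalize_token), identical in Source A and Source B
def pvJoinClean (parts : List String) : String :=
  PySem.Str.join " " ((parts.filter (fun p => p != "" && PySem.Str.strip p != "")).map PySem.Str.strip)

def pvNorm (token : String) : String :=
  String.ofList ((PySem.Chars.lower token.toList).filter (fun ch => PySem.Chars.isalnum ch || ch == '\''))

-- ===== PORT A =====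
-- A's first loop: for i in range(0, t - m + 1): if tail[i:i+m] == cand: return ""  (early
-- return ported as a Bool scan; k counts the remaining iterations)
def pvLoop1 (tail cand : List String) : Nat → Nat → Bool
  | _, 0 => false
  | i, k+1 =>
    if PySem.List.slice tail (some (i : Int)) (some ((i : Int) + (cand.length : Int))) = cand
    then true
    else pvLoop1 tail cand (i+1) k

-- A's second loop: for n in range(max_overlap, 0, -1): if tail[-n:] == cand[:n]: return …
def pvLoop2 (tail cand W : List String) : Nat → Option String
  | 0 => none
  | n+1 =>
    if PySem.List.slice tail (some (-((n+1 : Nat) : Int))) none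
        = PySem.List.slice cand none (some ((n+1 : Nat) : Int))
    then some (PySem.Str.strip (PySem.Str.join " " (W.drop (n+1))))
    else pvLoop2 tail cand W n

def trim_text_overlap_py (existing : String) (candidate : String) (lookback_chars : Int) : String :=
  let existing_clean := pvJoinClean [existing]
  let candidate_clean := pvJoinClean [candidate]
  if candidate_clean = "" then ""
  else if existing_clean = "" then candidate_clean
  else
    let existing_words := (PySem.Str.split₀ existing_clean).filter (fun w => pvNorm w != "")
    let candidate_words := (PySem.Str.split₀ candidate_clean).filter (fun w => pvNorm w != "")
    if candidate_words = [] then ""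
    else
      let existing_norm := existing_words.map pvNorm
      let candidate_norm := candidate_words.map pvNorm
      let lookback_tokens : Int := min (max 1 (PySem.Int.floordiv lookback_chars 4)) (existing_norm.length : Int)
      let existing_tail := PySem.List.slice existing_norm (some (-lookback_tokens)) none
      if candidate_norm.length ≤ existing_tail.length
         ∧ pvLoop1 existing_tail candidate_norm 0 (existing_tail.length - candidate_norm.length + 1) = true
      then ""
      else
        (pvLoop2 existing_tail candidate_norm candidate_words
            (min existing_tail.length candidate_norm.length)).getD
          (PySem.Str.strip (PySem.Str.join " " candidate_words))

-- ===== PORT B =====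
-- B's inner while loop: j += 1 while j < m and i + j < t and tail[i+j] == cand[j]
-- (the obvious structural recursion over the two lists: the three conditions are exactly
-- "both lists still nonempty and heads equal")
def pvLcp : List String → List String → Nat
  | x::xs, y::ys => if x = y then pvLcp xs ys + 1 else 0
  | _, _ => 0

-- B's single ascending scan over start positions i (k = t - i iterations remaining)
def pvScanB (tail cand W : List String) : Nat → Nat → String
  | _, 0 => PySem.Str.join " " W
  | i, k+1 =>
    let j := pvLcp (tail.drop i) cand
    if j = cand.length then ""
    else if i + j = tail.length then PySem.Str.join " " (W.drop (tail.length - i))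
    else pvScanB tail cand W (i+1) k

def trim_text_overlap_py_alt (existing : String) (candidate : String) (lookback_chars : Int) : String :=
  let candidate_clean := pvJoinClean [candidate]
  if candidate_clean = "" then ""
  else
    let existing_clean := pvJoinClean [existing]
    if existing_clean = "" then candidate_clean
    else
      let candidate_words := (PySem.Str.split₀ candidate_clean).filter (fun w => pvNorm w != "")
      if candidate_words = [] then ""
      else
        let existing_words := (PySem.Str.split₀ existing_clean).filter (fun w => pvNorm w != "")
        let cand := candidate_words.map pvNorm
        let exist := existing_words.map pvNorm
        let lookback_tokens : Int := min (max 1 (PySem.Int.floordiv lookback_chars 4)) (exist.length : Int)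
        let tail := exist.drop (exist.length - lookback_tokens.toNat)
        pvScanB tail cand candidate_words 0 tail.length

-- ===== PRECONDITION & SPEC =====
def Spec_trim_text_overlap_py (existing : String) (candidate : String) (lookback_chars : Int) (out : String) : Prop := out = trim_text_overlap_py_alt existing candidate lookback_chars
instance (existing : String) (candidate : String) (lookback_chars : Int) (out : String) : Decidable (Spec_trim_text_overlap_py existing candidate lookback_chars out) := by unfold Spec_trim_text_overlap_py; infer_instance

-- ===== CLAIM (what is proved, stated in full; the proofs are below) =====
def Claim_equal_trim_text_overlap_py : Prop := ∀ (existing : String) (candidate : String) (lookback_chars : Int), Dom_trim_text_overlap_py existing candidate lookback_chars → Spec_trim_text_overlap_py existing candidate lookback_chars (trim_text_overlap_py existing candidate lookback_chars)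

-- ===== LEMMAS AND PROOFS =====

theorem pvLcp_le_left (xs ys : List String) : pvLcp xs ys ≤ xs.length := by
  induction xs generalizing ys with
  | nil => simp [pvLcp]
  | cons x xs ih =>
    cases ys with
    | nil => simp [pvLcp]
    | cons y ys => simp only [pvLcp]; split_ifs <;> simp [Nat.succ_le_succ (ih ys)]

theorem pvLcp_le_right (xs ys : List String) : pvLcp xs ys ≤ ys.length := by
  induction xs generalizing ys with
  | nil => simp [pvLcp]
  | cons x xs ih =>
    cases ys with
    | nil => simp [pvLcp]
    | cons y ys => simp only [pvLcp]; split_ifs <;> simp [Nat.succ_le_succ (ih ys)]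

theorem pvLcp_eq_right_iff (xs ys : List String) : pvLcp xs ys = ys.length ↔ ys <+: xs := by
  induction xs generalizing ys with
  | nil =>
    cases ys with
    | nil => simp [pvLcp]
    | cons y ys => simp [pvLcp]
  | cons x xs ih =>
    cases ys with
    | nil => simp [pvLcp]
    | cons y ys =>
      simp only [pvLcp, List.length_cons, List.cons_prefix_cons]
      split_ifs with h
      · simpa [h] using ih ys
      · simp only [false_iff]
        exact fun hh => h hh.1.symm

theorem pvLcp_eq_left_iff (xs ys : List String) : pvLcp xs ys = xs.length ↔ xs <+: ys := by
  induction xs generalizing ys with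
  | nil => simp [pvLcp]
  | cons x xs ih =>
    cases ys with
    | nil => simp [pvLcp]
    | cons y ys =>
      simp only [pvLcp, List.length_cons, List.cons_prefix_cons]
      split_ifs with h
      · simpa [h] using ih ys
      · simp only [false_iff]
        exact fun hh => h hh.1

theorem pvSliceWindow_iff (tail cand : List String) (i : Nat) :
    PySem.List.slice tail (some (i : Int)) (some ((i : Int) + (cand.length : Int))) = cand
      ↔ cand <+: tail.drop i := by
  rw [PySem.List.slice_natCast_add]
  constructor
  · intro h; rw [← h]; exact List.take_prefix _ _
  · intro h; exact (List.prefix_iff_eq_take.mp h).symm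

theorem pvLoop1_true_iff (tail cand : List String) :
    ∀ k i, pvLoop1 tail cand i k = true ↔ ∃ d < k, cand <+: tail.drop (i + d) := by
  intro k
  induction k with
  | zero => intro i; simp [pvLoop1]
  | succ k ih =>
    intro i
    simp only [pvLoop1]
    split_ifs with h
    · simp only [true_iff]
      exact ⟨0, Nat.succ_pos _, by simpa using (pvSliceWindow_iff tail cand i).mp h⟩
    · rw [ih (i+1)]
      constructor
      · rintro ⟨d, hd, hp⟩
        exact ⟨d+1, by omega, by simpa [Nat.add_comm, Nat.add_left_comm] using hp⟩
      · rintro ⟨d, hd, hp⟩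
        cases d with
        | zero => exact absurd ((pvSliceWindow_iff tail cand i).mpr (by simpa using hp)) h
        | succ d => exact ⟨d, by omega, by simpa [Nat.add_comm, Nat.add_left_comm] using hp⟩

theorem pvOv_iff (tail cand : List String) (n : Nat) (hn : 0 < n) :
    (PySem.List.slice tail (some (-(n : Int))) none
        = PySem.List.slice cand none (some (n : Int)))
      ↔ tail.drop (tail.length - n) = cand.take n := by
  rw [PySem.List.slice_from_neg_natCast tail n hn, PySem.List.slice_to_natCast]

theorem pvLoop2_none_of (tail cand W : List String) (N : Nat)
    (h : ∀ n, 1 ≤ n → n ≤ N → tail.drop (tail.length - n) ≠ cand.take n) :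
    pvLoop2 tail cand W N = none := by
  induction N with
  | zero => simp [pvLoop2]
  | succ N ih =>
    simp only [pvLoop2]
    rw [if_neg, ih (fun n h1 h2 => h n h1 (by omega))]
    intro hc
    exact h (N+1) (by omega) le_rfl ((pvOv_iff tail cand (N+1) (by omega)).mp (by exact_mod_cast hc))

theorem pvLoop2_some_of (tail cand W : List String) (N : Nat) :
    ∀ n0, 1 ≤ n0 → n0 ≤ N →
    tail.drop (tail.length - n0) = cand.take n0 →
    (∀ n', n0 < n' → n' ≤ N → tail.drop (tail.length - n') ≠ cand.take n') →
    pvLoop2 tail cand W N = some (PySem.Str.strip (PySem.Str.join " " (W.drop n0))) := by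
  induction N with
  | zero => intro n0 h1 h2; omega
  | succ N ih =>
    intro n0 h1 h2 hov hmax
    simp only [pvLoop2]
    by_cases he : n0 = N+1
    · rw [if_pos, he]
      exact_mod_cast (pvOv_iff tail cand (N+1) (by omega)).mpr (he ▸ hov)
    · rw [if_neg, ih n0 h1 (by omega) hov (fun n' ha hb => hmax n' ha (by omega))]
      intro hc
      exact hmax (N+1) (by omega) le_rfl ((pvOv_iff tail cand (N+1) (by omega)).mp (by exact_mod_cast hc))

theorem pvSplit₀_go_mem (s : List Char) :
    ∀ cur acc (w : List Char),
      (∀ c ∈ cur, PySem.Chars.isspace c = false) →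
      (∀ w' ∈ acc, w' ≠ [] ∧ ∀ c ∈ w', PySem.Chars.isspace c = false) →
      w ∈ PySem.Chars.split₀.go s cur acc →
      w ≠ [] ∧ ∀ c ∈ w, PySem.Chars.isspace c = false := by
  induction s with
  | nil =>
    intro cur acc w hcur hacc hw
    simp only [PySem.Chars.split₀.go] at hw
    split_ifs at hw with h
    · exact hacc w (List.mem_reverse.mp hw)
    · rcases List.mem_cons.mp (List.mem_reverse.mp hw) with h1 | h2
      · subst h1
        refine ⟨by simpa [List.isEmpty_iff] using h, fun c hc => hcur c (List.mem_reverse.mp hc)⟩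
      · exact hacc w h2
  | cons c rest ih =>
    intro cur acc w hcur hacc hw
    simp only [PySem.Chars.split₀.go] at hw
    split_ifs at hw with h1 h2
    · exact ih [] acc w (by simp) hacc hw
    · refine ih [] _ w (by simp) ?_ hw
      intro w' hw'
      rcases List.mem_cons.mp hw' with h3 | h4
      · subst h3
        exact ⟨by simpa [List.isEmpty_iff] using h2, fun c' hc' => hcur c' (List.mem_reverse.mp hc')⟩
      · exact hacc w' h4
    · refine ih (c :: cur) acc w ?_ hacc hw
      intro c' hc'
      rcases List.mem_cons.mp hc' with h3 | h4
      · subst h3; simpa using h1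
      · exact hcur c' h4

theorem pvSplit₀_mem (s w : String) (h : w ∈ PySem.Str.split₀ s) :
    w.toList ≠ [] ∧ ∀ c ∈ w.toList, PySem.Chars.isspace c = false := by
  simp only [PySem.Str.split₀, List.mem_map] at h
  obtain ⟨v, hv, rfl⟩ := h
  simpa using pvSplit₀_go_mem s.toList [] [] v (by simp) (by simp) hv

theorem pvLstripOf (a : Char) (l : List Char) (h : PySem.Chars.isspace a = false) :
    PySem.Chars.lstrip (a :: l) = a :: l := by
  simp [PySem.Chars.lstrip, h]

theorem pvRstripOf (l : List Char) (a : Char) (h : PySem.Chars.isspace a = false) :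
    PySem.Chars.rstrip (l ++ [a]) = l ++ [a] := by
  simp [PySem.Chars.rstrip, h]

-- join of nonempty whitespace-free tokens starts and ends with a non-space character

theorem pvJoinDecomp (vs : List (List Char))
    (h : ∀ v ∈ vs, v ≠ [] ∧ ∀ c ∈ v, PySem.Chars.isspace c = false) (hne : vs ≠ []) :
    (∃ a l, PySem.Chars.join [' '] vs = a :: l ∧ PySem.Chars.isspace a = false) ∧
    (∃ l a, PySem.Chars.join [' '] vs = l ++ [a] ∧ PySem.Chars.isspace a = false) := by
  induction vs with
  | nil => exact absurd rfl hne
  | cons v vs ih =>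
    have hv := h v (List.mem_cons_self ..)
    have hvs : ∀ u ∈ vs, u ≠ [] ∧ ∀ c ∈ u, PySem.Chars.isspace c = false :=
      fun u hu => h u (List.mem_cons_of_mem _ hu)
    cases vs with
    | nil =>
      have hj : PySem.Chars.join [' '] [v] = v := by
        simp [PySem.Chars.join, List.intercalate]
      obtain ⟨a, l, rfl⟩ := List.exists_cons_of_ne_nil hv.1
      refine ⟨⟨a, l, by simp [hj], hv.2 a (by simp)⟩, ?_⟩
      obtain ⟨l', a', he⟩ := (a :: l).eq_nil_or_concat.resolve_left (by simp)
      exact ⟨l', a', by simp [he], hv.2 a' (by rw [he]; simp)⟩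
    | cons v' vs' =>
      have hj : PySem.Chars.join [' '] (v :: v' :: vs') =
          v ++ ' ' :: PySem.Chars.join [' '] (v' :: vs') := by
        simp [PySem.Chars.join, List.intercalate, List.intersperse]
      obtain ⟨⟨a2, l2, hj2, ha2⟩, ⟨l3, a3, hj3, ha3⟩⟩ := ih hvs (by simp)
      obtain ⟨a, l, rfl⟩ := List.exists_cons_of_ne_nil hv.1
      refine ⟨⟨a, l ++ ' ' :: PySem.Chars.join [' '] (v' :: vs'), by simp [hj],
          hv.2 a (by simp)⟩, ?_⟩
      exact ⟨(a :: l) ++ ' ' :: l3, a3, by rw [hj, hj3]; simp, ha3⟩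

theorem pvStripJoin (W : List String)
    (hW : ∀ w ∈ W, w.toList ≠ [] ∧ ∀ c ∈ w.toList, PySem.Chars.isspace c = false) :
    PySem.Str.strip (PySem.Str.join " " W) = PySem.Str.join " " W := by
  have hsep : " ".toList = [' '] := rfl
  cases hWn : W with
  | nil =>
    simp [PySem.Str.strip, PySem.Str.join, PySem.Chars.join, PySem.Chars.strip,
      PySem.Chars.lstrip, PySem.Chars.rstrip, List.intercalate]
  | cons w ws =>
    subst hWn
    obtain ⟨⟨a, l, hal, ha⟩, ⟨l', a', hla', ha'⟩⟩ :=
      pvJoinDecomp ((w :: ws).map String.toList)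
        (by intro v hv; obtain ⟨u, hu, rfl⟩ := List.mem_map.mp hv; exact hW u hu)
        (by simp)
    simp only [PySem.Str.strip, PySem.Str.join, hsep]
    rw [show (String.ofList (PySem.Chars.join [' '] (List.map String.toList (w :: ws)))).toList
        = PySem.Chars.join [' '] (List.map String.toList (w :: ws)) from by simp]
    congr 1
    rw [PySem.Chars.strip, hal, pvLstripOf a l ha, ← hal, hla', pvRstripOf l' a' ha']

theorem pvTail_eq (xs : List String) (q : Int) :
    PySem.List.slice xs (some (-(min (max 1 q) (xs.length : Int)))) none
      = xs.drop (xs.length - (min (max 1 q) (xs.length : Int)).toNat) := by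
  rcases Nat.eq_zero_or_pos xs.length with h0 | hpos
  · have hx : xs = [] := List.length_eq_zero_iff.mp h0
    subst hx
    rw [PySem.List.slice_some_none]
    simp
  · set L : Int := min (max 1 q) (xs.length : Int) with hL
    have h1 : 1 ≤ L := le_min (le_max_left _ _) (by exact_mod_cast hpos)
    have h2 : L ≤ (xs.length : Int) := min_le_right _ _
    have hk : L = ((L.toNat : Nat) : Int) := (Int.toNat_of_nonneg (by omega)).symm
    rw [hk, PySem.List.slice_from_neg_natCast xs L.toNat (by omega)]
    congr 1

theorem pvCoreAux (tail cand W : List String) (hc : cand ≠ [])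
    (hW : ∀ w ∈ W, w.toList ≠ [] ∧ ∀ c ∈ w.toList, PySem.Chars.isspace c = false) :
    ∀ k i, i + k = tail.length →
      (∀ i', i' < i → ¬(cand <+: tail.drop i' ∨ tail.drop i' <+: cand)) →
      (if cand.length ≤ tail.length
          ∧ pvLoop1 tail cand 0 (tail.length - cand.length + 1) = true
       then ""
       else (pvLoop2 tail cand W (min tail.length cand.length)).getD
              (PySem.Str.strip (PySem.Str.join " " W)))
        = pvScanB tail cand W i k := by
  have hm : 1 ≤ cand.length := List.length_pos_iff.mpr hc
  intro k
  induction k with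
  | zero =>
    intro i hik hnohit
    have hit : i = tail.length := by omega
    have hinf : ∀ i', ¬ cand <+: tail.drop i' := by
      intro i' hp
      have hlen := hp.length_le
      rw [List.length_drop] at hlen
      exact hnohit i' (by omega) (Or.inl hp)
    rw [if_neg, pvLoop2_none_of, Option.getD_none, pvStripJoin W hW]
    · simp [pvScanB]
    · intro n h1 h2 hov
      have hp : tail.drop (tail.length - n) <+: cand := by
        rw [hov]; exact List.take_prefix _ _
      exact hnohit (tail.length - n) (by omega) (Or.inr hp)
    · rintro ⟨hmt, hl1⟩
      rw [pvLoop1_true_iff] at hl1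
      obtain ⟨d, _, hp⟩ := hl1
      exact hinf d (by simpa using hp)
  | succ k ih =>
    intro i hik hnohit
    have hilt : i < tail.length := by omega
    simp only [pvScanB]
    have hjle : pvLcp (tail.drop i) cand ≤ tail.length - i := by
      have := pvLcp_le_left (tail.drop i) cand
      rwa [List.length_drop] at this
    have hjm : pvLcp (tail.drop i) cand ≤ cand.length := pvLcp_le_right _ _
    by_cases hjeq : pvLcp (tail.drop i) cand = cand.length
    · rw [if_pos hjeq, if_pos]
      constructor
      · omega
      · rw [pvLoop1_true_iff]
        exact ⟨i, by omega, by simpa using (pvLcp_eq_right_iff _ _).mp hjeq⟩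
    · rw [if_neg hjeq]
      by_cases hend : i + pvLcp (tail.drop i) cand = tail.length
      · rw [if_pos hend]
        have hpref : tail.drop i <+: cand :=
          (pvLcp_eq_left_iff _ _).mp (by rw [List.length_drop]; omega)
        set n0 := tail.length - i with hn0
        have hn0j : n0 = pvLcp (tail.drop i) cand := by omega
        have hn0m : n0 < cand.length := by omega
        have hov : tail.drop (tail.length - n0) = cand.take n0 := by
          rw [show tail.length - n0 = i by omega]
          have := List.prefix_iff_eq_take.mp hpref
          rw [List.length_drop] at this
          exact this
        rw [if_neg, pvLoop2_some_of tail cand W _ n0 (by omega) (by omega) hov, Option.getD_some,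
          pvStripJoin]
        · exact fun w hw => hW w (List.mem_of_mem_drop hw)
        · intro n' hgt hle hov'
          have hp : tail.drop (tail.length - n') <+: cand := by
            rw [hov']; exact List.take_prefix _ _
          exact hnohit (tail.length - n') (by omega) (Or.inr hp)
        · rintro ⟨hmt, hl1⟩
          rw [pvLoop1_true_iff] at hl1
          obtain ⟨d, _, hp⟩ := hl1
          simp only [Nat.zero_add] at hp
          rcases Nat.lt_or_ge d i with hdi | hdi
          · exact hnohit d hdi (Or.inl hp)
          · have hlen := hp.length_le
            rw [List.length_drop] at hlen
            omega
      · rw [if_neg hend, ih (i+1) (by omega)]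
        intro i' hi'
        rcases Nat.lt_or_ge i' i with h | h
        · exact hnohit i' h
        · have hii : i' = i := by omega
          subst hii
          rintro (hp | hp)
          · exact hjeq ((pvLcp_eq_right_iff _ _).mpr hp)
          · have := (pvLcp_eq_left_iff _ _).mpr hp
            rw [List.length_drop] at this
            omega

theorem pvCore (tail cand W : List String) (hc : cand ≠ [])
    (hW : ∀ w ∈ W, w.toList ≠ [] ∧ ∀ c ∈ w.toList, PySem.Chars.isspace c = false) :
    (if cand.length ≤ tail.length
        ∧ pvLoop1 tail cand 0 (tail.length - cand.length + 1) = true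
     then ""
     else (pvLoop2 tail cand W (min tail.length cand.length)).getD
            (PySem.Str.strip (PySem.Str.join " " W)))
      = pvScanB tail cand W 0 tail.length :=
  pvCoreAux tail cand W hc hW tail.length 0 (by omega) (by omega)

-- ===== VERDICT (by name: the statement is the Claim_ definition above) =====
theorem trim_text_overlap_py_spec : Claim_equal_trim_text_overlap_py := by
  intro existing candidate lookback_chars _hdom
  unfold Spec_trim_text_overlap_py trim_text_overlap_py trim_text_overlap_py_alt
  by_cases h1 : pvJoinClean [candidate] = ""
  · simp [h1]
  · by_cases h2 : pvJoinClean [existing] = ""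
    · simp [h1, h2]
    · by_cases h3 :
        (PySem.Str.split₀ (pvJoinClean [candidate])).filter (fun w => pvNorm w != "") = []
      · simp [h1, h2, h3]
      · simp only [if_neg h1, if_neg h2, if_neg h3]
        rw [pvTail_eq]
        exact pvCore _ _ _
          (by simpa using h3)
          (fun w hw => pvSplit₀_mem _ w (List.mem_of_mem_filter hw))
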